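-- pv_equiv track=rewrite | github.com/ivanmgomezs/Bigquery_repository | Uncripted.py | uncrypted
-- ===== SOURCE A (Python) =====
-- def check_key(message,keyword):
--     message_real=message#lower(message)
--     keyword_real=keyword#lower(keyword)
--     message_array=message_real.split()
--     for i in range(1,26):
--         new_key=''
--         for k in keyword:
--             if k.isupper():
--                 new_key+=chr((ord(k) - ord('A') + i) % 26 + ord('A'))
--             else:
--                 new_key+=chr((ord(k) - ord('a') + i) % 26 + ord('a'))
--         for j in message_array:
--             if j==new_key:
--                 return i
--     return 0
--
-- def uncrypted(message,keyword):
--     position=check_key(message,keyword)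
--     un_message=''
--     for letter in message:
--         if letter.isupper():
--             un_message+=chr((ord(letter)-ord('A')-position) % 26 + ord('A'))
--         else:
--             un_message+=chr((ord(letter)-ord('a')-position) % 26 + ord('a'))
--     return un_message
-- ===== SOURCE B (Python) =====
-- def _shift_char(i, k):
--     base = ord('A') if k.isupper() else ord('a')
--     return chr((ord(k) - base + i) % 26 + base)
--
-- def uncrypted(message, keyword):
--     # Derive the shift from each candidate word instead of trying all 25 shifts.
--     shifts = []
--     if keyword:
--         k0 = ord(keyword[0])
--         for w in message.split():
--             if len(w) != len(keyword):
--                 continue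
--             i = (ord(w[0]) - k0) % 26
--             if i != 0 and w == ''.join(_shift_char(i, k) for k in keyword):
--                 shifts.append(i)
--     position = min(shifts) if shifts else 0
--     return ''.join(_shift_char(-position, c) for c in message)
-- ===== Notes on version B (the rewrite author's own statement) =====
-- stated objective: faster
-- what changed: check_key's brute-force search that builds all 25 shifted keywords and scans the word list for each is replaced by a single pass over the message words that derives the one candidate shift from the first characters of each keyword-length word, verifies it by rebuilding the shifted keyword once, and returns the minimum valid shift.
import Mathlib
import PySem

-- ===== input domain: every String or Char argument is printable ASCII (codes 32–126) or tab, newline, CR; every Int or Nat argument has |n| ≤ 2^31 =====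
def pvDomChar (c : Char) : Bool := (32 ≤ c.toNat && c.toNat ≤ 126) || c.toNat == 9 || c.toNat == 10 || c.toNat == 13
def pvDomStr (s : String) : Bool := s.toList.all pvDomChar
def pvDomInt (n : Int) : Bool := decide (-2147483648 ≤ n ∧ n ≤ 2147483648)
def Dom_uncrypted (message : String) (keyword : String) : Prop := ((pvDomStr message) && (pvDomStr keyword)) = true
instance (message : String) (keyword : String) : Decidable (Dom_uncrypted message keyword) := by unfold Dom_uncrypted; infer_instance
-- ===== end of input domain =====

-- B derives the Caesar shift from each message word (one pass, verified rebuild) instead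
-- of A's search over all 25 shifts; objective: faster (measured).

-- ===== PORT A =====
-- chr/ord are ported by hand as Char.ofNat / Char.toNat: exact here because every
-- argument of chr lies in 0..122 (a small valid code point).
def shiftChar (i : Int) (k : Char) : Char :=
  if PySem.Chars.isupper k then
    Char.ofNat (PySem.Int.mod ((k.toNat : Int) - 65 + i) 26 + 65).toNat
  else
    Char.ofNat (PySem.Int.mod ((k.toNat : Int) - 97 + i) 26 + 97).toNat

-- the 'for i in range(1,26): … for j in message_array: if j==new_key: return i' loop
def checkKeyLoop (words : List (List Char)) (keyword : List Char) : List Int → Int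
  | [] => 0
  | i :: rest =>
    let newKey := keyword.foldl (fun acc k => acc ++ [shiftChar i k]) []
    if newKey ∈ words then i else checkKeyLoop words keyword rest

def checkKey (message : String) (keyword : String) : Int :=
  checkKeyLoop (PySem.Chars.split₀ message.toList) keyword.toList (PySem.List.pyRange 1 26)

-- per-letter decryption of A's second loop: chr((ord(letter)-base-position)%26+base)
def uncChar (position : Int) (letter : Char) : Char :=
  if PySem.Chars.isupper letter then
    Char.ofNat (PySem.Int.mod ((letter.toNat : Int) - 65 - position) 26 + 65).toNat
  else
    Char.ofNat (PySem.Int.mod ((letter.toNat : Int) - 97 - position) 26 + 97).toNat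

def uncrypted (message : String) (keyword : String) : String :=
  let position := checkKey message keyword
  String.ofList (message.toList.foldl (fun acc letter => acc ++ [uncChar position letter]) [])

-- ===== PORT B =====
def altShiftChar (i : Int) (k : Char) : Char :=
  let base : Int := if PySem.Chars.isupper k then 65 else 97
  Char.ofNat (PySem.Int.mod ((k.toNat : Int) - base + i) 26 + base).toNat

-- derived-shift pass: for each word of keyword's length, compute i from the first
-- characters, verify by rebuilding the shifted keyword.  (w.headD ' ' is w[0]; w is
-- nonempty whenever the length test passes, since kw is nonempty at every call site.)
def altShifts (words : List (List Char)) (k0 : Char) (kw : List Char) : List Int :=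
  words.filterMap (fun w =>
    if w.length ≠ kw.length then none
    else
      let i := PySem.Int.mod (((w.headD ' ').toNat : Int) - (k0.toNat : Int)) 26
      if i ≠ 0 ∧ w = kw.map (altShiftChar i) then some i else none)

def uncrypted_alt (message : String) (keyword : String) : String :=
  let shifts : List Int :=
    match keyword.toList with
    | [] => []
    | k0 :: rest => altShifts (PySem.Chars.split₀ message.toList) k0 (k0 :: rest)
  let position : Int :=
    match PySem.List.min? shifts (fun x => x) with
    | none => 0
    | some m => m
  String.ofList (message.toList.map (fun c => altShiftChar (-position) c))

-- ===== PRECONDITION & SPEC =====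
def Spec_uncrypted (message : String) (keyword : String) (out : String) : Prop := out = uncrypted_alt message keyword
instance (message : String) (keyword : String) (out : String) : Decidable (Spec_uncrypted message keyword out) := by unfold Spec_uncrypted; infer_instance

-- ===== CLAIM (what is proved, stated in full; the proofs are below) =====
def Claim_equal_uncrypted : Prop := ∀ (message : String) (keyword : String), Dom_uncrypted message keyword → Spec_uncrypted message keyword (uncrypted message keyword)

-- ===== LEMMAS AND PROOFS =====

theorem toNat_ofNat_small (n : Nat) (h : n < 55296) : (Char.ofNat n).toNat = n := by
  have hv : Nat.isValidChar n := Or.inl h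
  unfold Char.ofNat
  simp [hv, Char.ofNatAux]

theorem altShiftChar_eq (i : Int) : altShiftChar i = shiftChar i := by
  funext k
  unfold altShiftChar shiftChar
  by_cases h : PySem.Chars.isupper k <;> simp [h]

theorem uncChar_eq (p : Int) (c : Char) : uncChar p c = altShiftChar (-p) c := by
  unfold uncChar altShiftChar
  by_cases h : PySem.Chars.isupper c <;> simp [h, sub_eq_add_neg]

theorem shiftChar_toNat (i : Int) (k : Char) :
    ((shiftChar i k).toNat : Int) =
      PySem.Int.mod ((k.toNat : Int) - (if PySem.Chars.isupper k then (65 : Int) else 97) + i) 26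
        + (if PySem.Chars.isupper k then (65 : Int) else 97) := by
  unfold shiftChar
  by_cases h : PySem.Chars.isupper k <;>
      simp only [h, Bool.false_eq_true, if_true, if_false] <;>
  · set m := PySem.Int.mod ((k.toNat : Int) - _ + i) 26 with hm
    have h0 : 0 ≤ m := PySem.Int.mod_nonneg _ (by norm_num)
    have h1 : m < 26 := PySem.Int.mod_lt _ (by norm_num)
    rw [toNat_ofNat_small _ (by omega)]
    omega

theorem mod_shift_recover (i : Int) (k : Char) (h0 : 0 ≤ i) (h1 : i < 26) :
    PySem.Int.mod (((shiftChar i k).toNat : Int) - (k.toNat : Int)) 26 = i := by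
  rw [PySem.Int.mod_eq_emod_of_pos (by norm_num)]
  have := shiftChar_toNat i k
  rw [PySem.Int.mod_eq_emod_of_pos (by norm_num)] at this
  by_cases h : PySem.Chars.isupper k <;>
    simp only [h, Bool.false_eq_true, if_true, if_false] at this <;> omega

-- A's search loop returns the first shift of the list whose rebuilt keyword is a word
theorem checkKeyLoop_eq (words : List (List Char)) (kw : List Char) (l : List Int) :
    checkKeyLoop words kw l =
      ((l.filter (fun i => decide (kw.map (shiftChar i) ∈ words))).head?).getD 0 := by
  induction l with
  | nil => rfl
  | cons i rest ih =>
    rw [checkKeyLoop]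
    simp only [PySem.List.foldl_append_singleton_eq_map, List.nil_append, List.filter_cons]
    by_cases h : kw.map (shiftChar i) ∈ words <;> simp [h, ih]

-- every word produced by str.split() is nonempty
theorem split₀_go_ne_nil (s cur : List Char) (acc : List (List Char))
    (hacc : ∀ w ∈ acc, w ≠ []) :
    ∀ w ∈ PySem.Chars.split₀.go s cur acc, w ≠ [] := by
  induction s generalizing cur acc with
  | nil =>
    intro w hw
    rw [PySem.Chars.split₀.go] at hw
    by_cases hc : cur.isEmpty
    · simp only [hc, if_true, List.mem_reverse] at hw
      exact hacc w hw
    · simp only [hc, Bool.false_eq_true, if_false, List.mem_reverse, List.mem_cons] at hw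
      rcases hw with h | h
      · subst h
        simpa using (by simpa [List.isEmpty_iff] using hc : cur ≠ [])
      · exact hacc w h
  | cons c rest ih =>
    intro w hw
    rw [PySem.Chars.split₀.go] at hw
    by_cases hs : PySem.Chars.isspace c
    · by_cases hc : cur.isEmpty
      · simp only [hs, hc, if_true] at hw
        exact ih [] acc hacc w hw
      · simp only [hs, hc, Bool.false_eq_true, if_true, if_false] at hw
        refine ih [] (cur.reverse :: acc) ?_ w hw
        intro v hv
        rcases List.mem_cons.mp hv with h | h
        · subst h
          simpa using (by simpa [List.isEmpty_iff] using hc : cur ≠ [])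
        · exact hacc v h
    · simp only [hs, Bool.false_eq_true, if_false] at hw
      exact ih (c :: cur) acc hacc w hw

theorem split₀_ne_nil (s : List Char) : ∀ w ∈ PySem.Chars.split₀ s, w ≠ [] :=
  fun w hw => split₀_go_ne_nil s [] [] (by simp) w hw

-- B's candidate list contains exactly the shifts A's search accepts
theorem mem_altShifts (words : List (List Char)) (k0 : Char) (rest : List Char) (i : Int) :
    i ∈ altShifts words k0 (k0 :: rest) ↔
      (1 ≤ i ∧ i ≤ 25 ∧ (k0 :: rest).map (shiftChar i) ∈ words) := by
  unfold altShifts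
  rw [List.mem_filterMap]
  constructor
  · rintro ⟨w, hw, hf⟩
    split at hf
    · exact absurd hf (by simp)
    · simp only [] at hf
      split at hf
      · next hcond =>
          cases hf
          have h0 : 0 ≤ PySem.Int.mod (((w.headD ' ').toNat : Int) - (k0.toNat : Int)) 26 :=
            PySem.Int.mod_nonneg _ (by norm_num)
          have h1 : PySem.Int.mod (((w.headD ' ').toNat : Int) - (k0.toNat : Int)) 26 < 26 :=
            PySem.Int.mod_lt _ (by norm_num)
          refine ⟨by omega, by omega, ?_⟩
          have hwmap := hcond.2
          rw [altShiftChar_eq] at hwmap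
          rw [← hwmap]
          exact hw
      · exact absurd hf (by simp)
  · rintro ⟨h1, h2, hmem⟩
    refine ⟨(k0 :: rest).map (shiftChar i), hmem, ?_⟩
    have hlen : ¬ ((k0 :: rest).map (shiftChar i)).length ≠ (k0 :: rest).length := by simp
    rw [if_neg hlen]
    simp only [List.map_cons, List.headD_cons]
    rw [mod_shift_recover i k0 (by omega) (by omega)]
    have hmapeq : shiftChar i k0 :: rest.map (shiftChar i)
        = (k0 :: rest).map (altShiftChar i) := by
      rw [altShiftChar_eq]; rfl
    rw [if_pos ⟨by omega, hmapeq⟩]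

theorem pyRange_1_26_pairwise : (PySem.List.pyRange 1 26).Pairwise (· < ·) := by decide

-- the two shift computations agree
theorem position_eq (message keyword : String) :
    checkKey message keyword =
      (match PySem.List.min?
          (match keyword.toList with
           | [] => ([] : List Int)
           | k0 :: rest => altShifts (PySem.Chars.split₀ message.toList) k0 (k0 :: rest))
          (fun x => x) with
       | none => 0
       | some m => m) := by
  cases hkw : keyword.toList with
  | nil =>
    rw [checkKey, hkw, checkKeyLoop_eq]
    have hno : ([] : List Char) ∉ PySem.Chars.split₀ message.toList :=
      fun h => split₀_ne_nil _ _ h rfl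
    simp [hno, PySem.List.min?]
  | cons k0 rest =>
    rw [checkKey, hkw, checkKeyLoop_eq]
    set words := PySem.Chars.split₀ message.toList with hwords
    set C := altShifts words k0 (k0 :: rest) with hC
    set S := (PySem.List.pyRange 1 26).filter
        (fun i => decide ((k0 :: rest).map (shiftChar i) ∈ words)) with hS
    have memS : ∀ i : Int, i ∈ S ↔ (1 ≤ i ∧ i ≤ 25 ∧ (k0 :: rest).map (shiftChar i) ∈ words) := by
      intro i
      rw [hS, List.mem_filter, PySem.List.mem_pyRange_one]
      simp only [decide_eq_true_eq]
      constructor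
      · rintro ⟨⟨ha, hb⟩, hp⟩; exact ⟨ha, by omega, hp⟩
      · rintro ⟨ha, hb, hp⟩; exact ⟨⟨ha, by omega⟩, hp⟩
    have memC : ∀ i : Int, i ∈ C ↔ (1 ≤ i ∧ i ≤ 25 ∧ (k0 :: rest).map (shiftChar i) ∈ words) :=
      fun i => mem_altShifts words k0 rest i
    cases hmin : PySem.List.min? C (fun x => x) with
    | none =>
      have hCnil : C = [] := (PySem.List.min?_eq_none_iff C _).mp hmin
      have hSnil : S = [] := by
        rw [List.eq_nil_iff_forall_not_mem]
        intro i hi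
        have h := (memS i).mp hi
        have : i ∈ C := (memC i).mpr h
        rw [hCnil] at this
        exact absurd this (List.not_mem_nil)
      rw [hSnil]
      rfl
    | some m =>
      have hmC : m ∈ C := PySem.List.min?_mem hmin
      have hmS : m ∈ S := (memS m).mpr ((memC m).mp hmC)
      obtain ⟨h, t, hHT⟩ := List.exists_cons_of_ne_nil (List.ne_nil_of_mem hmS)
      have hpw : S.Pairwise (· < ·) := by
        rw [hS]
        exact List.Pairwise.filter _ pyRange_1_26_pairwise
      have hhm : h ≤ m := by
        rw [hHT] at hmS hpw
        rcases List.mem_cons.mp hmS with rfl | hmt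
        · exact le_refl m
        · exact le_of_lt ((List.pairwise_cons.mp hpw).1 m hmt)
      have hmh : m ≤ h := by
        have hhS : h ∈ S := by rw [hHT]; exact List.mem_cons_self
        have hhC : h ∈ C := (memC h).mpr ((memS h).mp hhS)
        exact PySem.List.min?_isMin hmin h hhC
      rw [hHT]
      simp only [List.head?_cons, Option.getD_some]
      omega

-- ===== VERDICT (by name: the statement is the Claim_ definition above) =====
theorem uncrypted_spec : Claim_equal_uncrypted := by
  intro message keyword _
  show uncrypted message keyword = uncrypted_alt message keyword
  unfold uncrypted uncrypted_alt
  simp only [PySem.List.foldl_append_singleton_eq_map, List.nil_append]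
  rw [position_eq message keyword]
  congr 1
  exact List.map_congr_left (fun c _ => uncChar_eq _ c)
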